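-- pv_equiv track=rewrite | github.com/crossback2000/python-coding-test | problems/34.py | preprocess_palindrome
-- ===== SOURCE A (Python) =====
-- from typing import List
--
-- def preprocess_palindrome(s: str) -> List[List[bool]]:
--     """모든 구간이 회문인지 여부를 O(n^2)에 미리 계산한다."""
--
--     n = len(s)
--     is_pal = [[False] * n for _ in range(n)]
--
--     # 길이 1인 구간은 모두 회문이다.
--     for i in range(n):
--         is_pal[i][i] = True
--
--     # 길이 2 이상인 구간을 확장 길이 기준으로 채운다.
--     for length in range(2, n + 1):
--         for start in range(n - length + 1):
--             end = start + length - 1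
--             if s[start] == s[end]:
--                 if length == 2:
--                     # 길이 2인 경우 양 끝만 비교하면 된다.
--                     is_pal[start][end] = True
--                 else:
--                     # 양 끝이 같고 내부 구간이 회문이면 전체도 회문이다.
--                     is_pal[start][end] = is_pal[start + 1][end - 1]
--     return is_pal
-- ===== SOURCE B (Python) =====
-- from typing import List
--
-- def preprocess_palindrome(s: str) -> List[List[bool]]:
--     """Per-cell direct check: s[i:j+1] is a palindrome iff it equals its reverse."""
--     n = len(s)
--     return [[i <= j and s[i:j + 1] == s[i:j + 1][::-1] for j in range(n)]
--             for i in range(n)]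
-- ===== Notes on version B (the rewrite author's own statement) =====
-- stated objective: simpler
-- what changed: Replaced the length-indexed DP that fills the table via the inner-substring recurrence with a direct per-cell comprehension that tests each slice against its reverse.
import Mathlib
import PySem

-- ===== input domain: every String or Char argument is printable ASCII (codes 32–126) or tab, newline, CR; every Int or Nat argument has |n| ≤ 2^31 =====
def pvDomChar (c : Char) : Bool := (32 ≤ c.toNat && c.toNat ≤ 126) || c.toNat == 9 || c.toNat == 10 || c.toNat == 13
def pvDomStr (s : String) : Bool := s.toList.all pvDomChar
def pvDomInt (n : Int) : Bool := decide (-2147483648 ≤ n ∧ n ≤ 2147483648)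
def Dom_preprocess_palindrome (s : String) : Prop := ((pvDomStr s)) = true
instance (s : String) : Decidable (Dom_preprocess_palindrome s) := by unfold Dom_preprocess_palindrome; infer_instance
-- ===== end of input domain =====

-- B replaces A's length-indexed DP recurrence with a direct per-cell slice-vs-reverse check (simpler, same result).

-- ===== PORT A =====
-- is_pal[i][j] = v  (A only writes cells whose indices are in range, so List.set is exact)
def pvSet2 (m : List (List Bool)) (i j : Nat) (v : Bool) : List (List Bool) :=
  m.set i ((m.getD i []).set j v)

-- is_pal[i][j]  (A only reads cells whose indices are in range, so getD is exact)
def pvGet2 (m : List (List Bool)) (i j : Nat) : Bool :=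
  (m.getD i []).getD j false

def preprocess_palindrome (s : String) : List (List Bool) :=
  let cs := s.toList
  let n := cs.length
  -- is_pal = [[False] * n for _ in range(n)]
  let m0 : List (List Bool) := (List.range n).map (fun _ => List.replicate n false)
  -- for i in range(n): is_pal[i][i] = True
  let m1 := (List.range n).foldl (fun m i => pvSet2 m i i true) m0
  -- for length in range(2, n + 1): …   (that range has n - 1 elements)
  (List.range' 2 (n - 1)).foldl (fun m len =>
    -- for start in range(n - length + 1): …
    (List.range (n - len + 1)).foldl (fun m start =>
      let e := start + len - 1
      -- s[start] == s[end]; both indices are in range here, so getD is exact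
      if cs.getD start ' ' = cs.getD e ' ' then
        if len = 2 then pvSet2 m start e true
        else pvSet2 m start e (pvGet2 m (start + 1) (e - 1))
      else m) m) m1

-- ===== PORT B =====
-- s[i:j+1] → PySem.List.slice; sub[::-1] is sub.reverse (PySem.List.slice?_none_none_neg_one)
def preprocess_palindrome_alt (s : String) : List (List Bool) :=
  let cs := s.toList
  let n := cs.length
  (List.range n).map (fun (i : Nat) => (List.range n).map (fun (j : Nat) =>
    decide (i ≤ j) &&
      (let sub := PySem.List.slice cs (some (i : Int)) (some ((j : Int) + 1))
       decide (sub = sub.reverse))))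

-- ===== PRECONDITION & SPEC =====
def Spec_preprocess_palindrome (s : String) (out : List (List Bool)) : Prop := out = preprocess_palindrome_alt s
instance (s : String) (out : List (List Bool)) : Decidable (Spec_preprocess_palindrome s out) := by unfold Spec_preprocess_palindrome; infer_instance

-- ===== CLAIM (what is proved, stated in full; the proofs are below) =====
def Claim_equal_preprocess_palindrome : Prop := ∀ (s : String), Dom_preprocess_palindrome s → Spec_preprocess_palindrome s (preprocess_palindrome s)

-- ===== LEMMAS AND PROOFS =====

-- an n×n table whose (i,j) cell is g i j
def pvTbl (n : Nat) (g : Nat → Nat → Bool) : List (List Bool) :=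
  (List.range n).map (fun i => (List.range n).map (g i))

-- the slice s[i:j+1] in drop/take form
def pvSub (cs : List Char) (i j : Nat) : List Char := (cs.drop i).take (j + 1 - i)

-- the intended final value of cell (i,j): i ≤ j and s[i:j+1] is a palindrome
def pvEntry (cs : List Char) (i j : Nat) : Bool :=
  decide (i ≤ j) && decide (pvSub cs i j = (pvSub cs i j).reverse)

-- A's table after all lengths ≤ L have been processed
def pvPT (cs : List Char) (L : Nat) : List (List Bool) :=
  pvTbl cs.length (fun i j => if j < i + L then pvEntry cs i j else false)

-- A's table mid inner loop of length L: starts < S already done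
def pvPTP (cs : List Char) (L S : Nat) : List (List Bool) :=
  pvTbl cs.length (fun i j =>
    if j + 1 < i + L ∨ (j + 1 = i + L ∧ i < S) then pvEntry cs i j else false)

theorem pvTbl_congr {n : Nat} {g g' : Nat → Nat → Bool}
    (h : ∀ i, i < n → ∀ j, j < n → g i j = g' i j) : pvTbl n g = pvTbl n g' := by
  unfold pvTbl
  refine List.map_congr_left (fun i hi => ?_)
  exact List.map_congr_left (fun j hj => h i (List.mem_range.mp hi) j (List.mem_range.mp hj))

theorem pvRow_tbl {n i : Nat} (g : Nat → Nat → Bool) (hi : i < n) :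
    (pvTbl n g).getD i [] = (List.range n).map (g i) := by
  unfold pvTbl
  rw [List.getD_eq_getElem _ _ (by simpa using hi)]
  simp

theorem pvGet2_tbl {n i j : Nat} (g : Nat → Nat → Bool) (hi : i < n) (hj : j < n) :
    pvGet2 (pvTbl n g) i j = g i j := by
  unfold pvGet2
  rw [pvRow_tbl g hi, List.getD_eq_getElem _ _ (by simpa using hj)]
  simp

theorem pvSet2_tbl {n i j : Nat} (g : Nat → Nat → Bool) (v : Bool) (hi : i < n) (hj : j < n) :
    pvSet2 (pvTbl n g) i j v
      = pvTbl n (fun i' j' => if i' = i ∧ j' = j then v else g i' j') := by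
  unfold pvSet2
  rw [pvRow_tbl g hi]
  unfold pvTbl
  apply List.ext_getElem (by simp)
  intro a h1 h2
  have han : a < n := by simpa using h2
  simp only [List.getElem_set, List.getElem_map, List.getElem_range]
  by_cases ha : i = a
  · subst ha
    rw [if_pos rfl]
    apply List.ext_getElem (by simp)
    intro b h3 h4
    have hbn : b < n := by simpa using h4
    simp only [List.getElem_set, List.getElem_map, List.getElem_range]
    by_cases hb : j = b
    · subst hb; simp
    · rw [if_neg hb, if_neg (by tauto)]
  · rw [if_neg ha]
    apply List.ext_getElem (by simp)
    intro b h3 h4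
    simp only [List.getElem_map, List.getElem_range]
    rw [if_neg (by tauto)]

-- palindromicity recurrence on a :: (mid ++ [b])
theorem pvPalStep (a b : Char) (mid : List Char) :
    decide ((a :: (mid ++ [b])) = (a :: (mid ++ [b])).reverse)
      = (decide (a = b) && decide (mid = mid.reverse)) := by
  have key : ((a :: (mid ++ [b])) = (a :: (mid ++ [b])).reverse) ↔ (a = b ∧ mid = mid.reverse) := by
    constructor
    · intro h
      simp only [List.reverse_cons, List.reverse_append] at h
      injection h with h1 h2
      refine ⟨h1, ?_⟩
      have h2' : mid ++ [b] = mid.reverse ++ [a] := by simpa using h2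
      exact List.append_inj_left' h2' (by simp)
    · rintro ⟨rfl, hm⟩
      simp [List.reverse_cons, List.reverse_append, ← hm]
  rw [show (decide (a = b) && decide (mid = mid.reverse))
        = decide (a = b ∧ mid = mid.reverse) from (Bool.decide_and _ _).symm]
  exact decide_eq_decide.mpr key

theorem pvEntry_diag {cs : List Char} {i : Nat} (hi : i < cs.length) :
    pvEntry cs i i = true := by
  have hone : pvSub cs i i = [cs[i]] := by
    unfold pvSub
    rw [List.drop_eq_getElem_cons hi, show i + 1 - i = 0 + 1 from by omega,
      List.take_succ_cons, List.take_zero]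
  unfold pvEntry
  rw [hone]
  simp

theorem pvEntry_lower {cs : List Char} {i j : Nat} (h : j < i) : pvEntry cs i j = false := by
  unfold pvEntry
  simp [Nat.not_le.mpr h]

-- the DP recurrence holds for the intended value
theorem pvEntry_rec {cs : List Char} {i j : Nat} (hij : i < j) (hj : j < cs.length) :
    pvEntry cs i j
      = (decide (cs.getD i ' ' = cs.getD j ' ')
          && (if j = i + 1 then true else pvEntry cs (i + 1) (j - 1))) := by
  have hi : i < cs.length := lt_trans hij hj
  have hdecomp : pvSub cs i j = cs[i] :: (pvSub cs (i + 1) (j - 1) ++ [cs[j]]) := by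
    unfold pvSub
    have h2 : (j - 1) + 1 - (i + 1) = j - i - 1 := by omega
    rw [h2, List.drop_eq_getElem_cons hi]
    have h1 : j + 1 - i = (j - i - 1 + 1) + 1 := by omega
    rw [h1, List.take_succ_cons]
    congr 1
    rw [List.take_add_one]
    congr 1
    rw [List.getElem?_drop]
    have h3 : i + 1 + (j - i - 1) = j := by omega
    rw [h3, List.getElem?_eq_getElem hj]
    rfl
  have hA : pvEntry cs i j = decide (pvSub cs i j = (pvSub cs i j).reverse) := by
    unfold pvEntry
    simp [Nat.le_of_lt hij]
  rw [hA, hdecomp, pvPalStep]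
  rw [List.getD_eq_getElem _ _ hi, List.getD_eq_getElem _ _ hj]
  by_cases h2 : j = i + 1
  · subst h2
    have hmid : pvSub cs (i + 1) (i + 1 - 1) = [] := by
      unfold pvSub; simp
    rw [hmid]
    simp
  · have hle : i + 1 ≤ j - 1 := by omega
    rw [if_neg h2]
    unfold pvEntry
    simp [hle]

-- the diagonal initialisation produces the length-1 table
theorem pvDiagInit (cs : List Char) :
    (List.range cs.length).foldl (fun m i => pvSet2 m i i true)
        ((List.range cs.length).map (fun _ => List.replicate cs.length false))
      = pvPT cs 1 := by
  have hrep : (List.range cs.length).map (fun _ => (List.replicate cs.length false : List Bool))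
      = pvTbl cs.length (fun _ _ => false) := by
    unfold pvTbl
    congr 1
    funext i
    simp
  rw [hrep]
  have key : ∀ k, k ≤ cs.length →
      (List.range k).foldl (fun m i => pvSet2 m i i true) (pvTbl cs.length (fun _ _ => false))
        = pvTbl cs.length (fun i j => if i = j ∧ i < k then true else false) := by
    intro k
    induction k with
    | zero => intro _; simp
    | succ k ih =>
      intro hk
      rw [List.range_succ, List.foldl_append, ih (by omega)]
      simp only [List.foldl_cons, List.foldl_nil]
      rw [pvSet2_tbl _ _ (by omega) (by omega)]
      apply pvTbl_congr
      intro i hi j hj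
      by_cases h' : i = k ∧ j = k
      · obtain ⟨rfl, rfl⟩ := h'
        rw [if_pos ⟨rfl, rfl⟩, if_pos ⟨rfl, by omega⟩]
      · rw [if_neg h']
        by_cases h : i = j ∧ i < k + 1
        · rw [if_pos h, if_pos ⟨h.1, by omega⟩]
        · rw [if_neg h, if_neg (by omega)]
  rw [key cs.length le_rfl]
  unfold pvPT
  apply pvTbl_congr
  intro i hi j hj
  by_cases h : i = j
  · subst h
    rw [if_pos ⟨rfl, hi⟩, if_pos (by omega), pvEntry_diag hi]
  · by_cases h2 : j < i + 1
    · have hji : j < i := by omega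
      rw [if_neg (by omega), if_pos h2, pvEntry_lower hji]
    · rw [if_neg (by omega), if_neg h2]

-- one inner-loop step at start = S keeps the pvPTP shape
theorem pvInnerStep (cs : List Char) (L S : Nat) (hL : 2 ≤ L) (hLn : L ≤ cs.length)
    (hS : S < cs.length - L + 1) :
    (fun m start =>
      let e := start + L - 1
      if cs.getD start ' ' = cs.getD e ' ' then
        if L = 2 then pvSet2 m start e true
        else pvSet2 m start e (pvGet2 m (start + 1) (e - 1))
      else m) (pvPTP cs L S) S
      = pvPTP cs L (S + 1) := by
  have he : S + L - 1 < cs.length := by omega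
  have hSn : S < cs.length := by omega
  have hSe : S < S + L - 1 := by omega
  have hrec := pvEntry_rec hSe he
  have hiff : ∀ i j : Nat, ¬(i = S ∧ j = S + L - 1) →
      ((j + 1 < i + L ∨ (j + 1 = i + L ∧ i < S))
        ↔ (j + 1 < i + L ∨ (j + 1 = i + L ∧ i < S + 1))) := by
    intro i j hcell
    constructor <;> rintro (h | ⟨h1, h2⟩)
    · left; exact h
    · right; exact ⟨h1, by omega⟩
    · left; exact h
    · right
      refine ⟨h1, ?_⟩
      rcases Nat.lt_succ_iff_lt_or_eq.mp h2 with h3 | h3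
      · exact h3
      · exfalso; exact hcell ⟨h3, by omega⟩
  simp only []
  by_cases hc : cs.getD S ' ' = cs.getD (S + L - 1) ' '
  · rw [if_pos hc]
    have hval : (if L = 2 then true else pvGet2 (pvPTP cs L S) (S + 1) (S + L - 1 - 1))
        = pvEntry cs S (S + L - 1) := by
      by_cases h2 : L = 2
      · subst h2
        rw [if_pos rfl, hrec, if_pos (by omega), decide_eq_true hc, Bool.true_and]
      · rw [if_neg h2]
        unfold pvPTP
        rw [pvGet2_tbl _ (by omega) (by omega), if_pos (by left; omega)]
        rw [hrec, if_neg (by omega), decide_eq_true hc, Bool.true_and]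
    have hset : ∀ v, v = pvEntry cs S (S + L - 1) →
        pvSet2 (pvPTP cs L S) S (S + L - 1) v = pvPTP cs L (S + 1) := by
      intro v hv
      subst hv
      unfold pvPTP
      rw [pvSet2_tbl _ _ hSn he]
      apply pvTbl_congr
      intro i hi j hj
      by_cases hcell : i = S ∧ j = S + L - 1
      · obtain ⟨rfl, rfl⟩ := hcell
        rw [if_pos ⟨rfl, rfl⟩, if_pos (by omega)]
      · rw [if_neg hcell]
        have := hiff i j hcell
        split_ifs with hA hB hB
        · rfl
        · exact absurd (this.mp hA) hB
        · exact absurd (this.mpr hB) hA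
        · rfl
    by_cases h2 : L = 2
    · rw [if_pos h2]
      exact hset true (by rw [← hval, if_pos h2])
    · rw [if_neg h2]
      exact hset _ (by rw [← hval, if_neg h2])
  · rw [if_neg hc]
    unfold pvPTP
    apply pvTbl_congr
    intro i hi j hj
    by_cases hcell : i = S ∧ j = S + L - 1
    · obtain ⟨rfl, rfl⟩ := hcell
      rw [if_neg (by omega), if_pos (by omega), hrec, decide_eq_false hc, Bool.false_and]
    · have := hiff i j hcell
      split_ifs with hA hB hB
      · rfl
      · exact absurd (this.mp hA) hB
      · exact absurd (this.mpr hB) hA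
      · rfl

-- the whole inner loop for one length L
theorem pvInnerLoop (cs : List Char) (L : Nat) (hL : 2 ≤ L) (hLn : L ≤ cs.length) :
    (List.range (cs.length - L + 1)).foldl
      (fun m start =>
        let e := start + L - 1
        if cs.getD start ' ' = cs.getD e ' ' then
          if L = 2 then pvSet2 m start e true
          else pvSet2 m start e (pvGet2 m (start + 1) (e - 1))
        else m) (pvPT cs (L - 1))
      = pvPT cs L := by
  have base : pvPT cs (L - 1) = pvPTP cs L 0 := by
    unfold pvPT pvPTP
    apply pvTbl_congr
    intro i hi j hj
    have hiff : (j < i + (L - 1)) ↔ (j + 1 < i + L ∨ (j + 1 = i + L ∧ i < 0)) := by omega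
    split_ifs with hA hB hB
    · rfl
    · exact absurd (hiff.mp hA) hB
    · exact absurd (hiff.mpr hB) hA
    · rfl
  rw [base]
  have key : ∀ S, S ≤ cs.length - L + 1 →
      (List.range S).foldl
        (fun m start =>
          let e := start + L - 1
          if cs.getD start ' ' = cs.getD e ' ' then
            if L = 2 then pvSet2 m start e true
            else pvSet2 m start e (pvGet2 m (start + 1) (e - 1))
          else m) (pvPTP cs L 0)
        = pvPTP cs L S := by
    intro S
    induction S with
    | zero => intro _; simp
    | succ S ih =>
      intro hS
      rw [List.range_succ, List.foldl_append, ih (by omega)]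
      simp only [List.foldl_cons, List.foldl_nil]
      exact pvInnerStep cs L S hL hLn (by omega)
  rw [key _ le_rfl]
  unfold pvPT pvPTP
  apply pvTbl_congr
  intro i hi j hj
  have hiff : (j + 1 < i + L ∨ (j + 1 = i + L ∧ i < cs.length - L + 1)) ↔ (j < i + L) := by
    omega
  split_ifs with hA hB hB
  · rfl
  · exact absurd (hiff.mp hA) hB
  · exact absurd (hiff.mpr hB) hA
  · rfl

-- the outer loop over lengths 2 .. k+1
theorem pvOuterLoop (cs : List Char) (k : Nat) (hk : k ≤ cs.length - 1) :
    (List.range' 2 k).foldl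
      (fun m len =>
        (List.range (cs.length - len + 1)).foldl
          (fun m start =>
            let e := start + len - 1
            if cs.getD start ' ' = cs.getD e ' ' then
              if len = 2 then pvSet2 m start e true
              else pvSet2 m start e (pvGet2 m (start + 1) (e - 1))
            else m) m) (pvPT cs 1)
      = pvPT cs (k + 1) := by
  induction k with
  | zero => simp
  | succ k ih =>
    rw [List.range'_1_concat, List.foldl_append, ih (by omega)]
    simp only [List.foldl_cons, List.foldl_nil]
    have h1 : (2 + k) - 1 = k + 1 := by omega
    have := pvInnerLoop cs (2 + k) (by omega) (by omega)
    rw [h1] at this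
    rw [this]
    congr 1
    omega

-- ===== VERDICT (by name: the statement is the Claim_ definition above) =====
theorem preprocess_palindrome_spec : Claim_equal_preprocess_palindrome := by
  intro s _
  unfold Spec_preprocess_palindrome preprocess_palindrome preprocess_palindrome_alt
  simp only []
  rw [pvDiagInit s.toList, pvOuterLoop s.toList (s.toList.length - 1) le_rfl]
  have hslice : ∀ i j : Nat,
      PySem.List.slice s.toList (some (i : Int)) (some ((j : Int) + 1)) = pvSub s.toList i j := by
    intro i j
    have hcast : ((j : Int) + 1) = (((j + 1 : Nat)) : Int) := by push_cast; ring
    rw [hcast, PySem.List.slice_natCast]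
    rfl
  simp only [hslice]
  have halt : (List.range s.toList.length).map (fun i => (List.range s.toList.length).map (fun j =>
      decide (i ≤ j) && decide (pvSub s.toList i j = (pvSub s.toList i j).reverse)))
      = pvTbl s.toList.length (fun i j => pvEntry s.toList i j) := by
    unfold pvTbl pvEntry
    rfl
  rw [halt]
  unfold pvPT
  apply pvTbl_congr
  intro i hi j hj
  rw [if_pos (by omega)]
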